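-- pv_equiv track=rewrite | github.com/ck2w/baruch-mfe-lab | MTH9900/code/structure.py | index_from_path
-- ===== SOURCE A (Python) =====
-- def index_from_path(path):
--     n = len(path)
--     base = (4**n-1)//3
--     sub = 0
--     for i in range(n):
--         assert path[i] >=0 and path[i] < 4
--         sub = sub*4 + path[i]
--     return base+sub
-- ===== SOURCE B (Python) =====
-- def index_from_path(path):
--     # Back-to-front place-value pass: each step adds (digit+1) * 4^position,
--     # maintaining the power explicitly; no Horner recurrence, no closed-form offset.
--     idx = 0
--     p = 1
--     for x in reversed(path):
--         assert 0 <= x < 4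
--         idx += (x + 1) * p
--         p *= 4
--     return idx
-- ===== Notes on version B (the rewrite author's own statement) =====
-- stated objective: alternative
-- what changed: B traverses the path back-to-front maintaining an explicit running power of 4 and adds (digit+1)*4^position each step (bijective base-4 place values), instead of A's front-to-back Horner recurrence plus a separately computed closed-form offset (4**n-1)//3.
import Mathlib
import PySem

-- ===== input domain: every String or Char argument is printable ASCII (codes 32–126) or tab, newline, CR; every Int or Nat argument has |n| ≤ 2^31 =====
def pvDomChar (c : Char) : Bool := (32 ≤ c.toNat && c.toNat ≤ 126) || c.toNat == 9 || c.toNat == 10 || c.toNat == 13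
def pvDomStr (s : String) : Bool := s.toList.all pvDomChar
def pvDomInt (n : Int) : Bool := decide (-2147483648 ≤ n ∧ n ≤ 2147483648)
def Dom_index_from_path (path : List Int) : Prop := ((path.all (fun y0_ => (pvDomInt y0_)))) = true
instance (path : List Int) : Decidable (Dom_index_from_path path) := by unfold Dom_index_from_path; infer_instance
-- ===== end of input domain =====

-- B accumulates (digit+1)*4^position back-to-front with an explicit running power,
-- replacing A's front-to-back Horner loop plus separate closed-form offset (alternative).


-- ===== PORT A =====
-- A's assert raises when an element is outside 0..3; Pre_ excludes those inputs
def index_from_path (path : List Int) : Int :=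
  let n := path.length
  let base := PySem.Int.floordiv (4 ^ n - 1) 3
  let sub := path.foldl (fun s x => s * 4 + x) 0
  base + sub

-- ===== PORT B =====
def index_from_path_alt (path : List Int) : Int :=
  (path.reverse.foldl (fun st x => (st.1 + (x + 1) * st.2, st.2 * 4)) ((0:Int), (1:Int))).1

-- ===== PRECONDITION & SPEC =====
-- Pre_ excludes inputs with an element outside 0..3, on which both programs' assert raises AssertionError
def Pre_index_from_path (path : List Int) : Prop := ∀ x ∈ path, 0 ≤ x ∧ x < 4
instance (path : List Int) : Decidable (Pre_index_from_path path) := by unfold Pre_index_from_path; infer_instance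
def pvWitness_index_from_path : List Int := [2, 0, 3]

def Spec_index_from_path (path : List Int) (out : Int) : Prop := out = index_from_path_alt path
instance (path : List Int) (out : Int) : Decidable (Spec_index_from_path path out) := by unfold Spec_index_from_path; infer_instance

-- ===== CLAIM (what is proved, stated in full; the proofs are below) =====
def Claim_equal_index_from_path : Prop := ∀ (path : List Int), Dom_index_from_path path → Pre_index_from_path path → Spec_index_from_path path (index_from_path path)

-- ===== LEMMAS AND PROOFS =====

-- recursive value of B's pair fold: W [] = 0, W (x::t) = (x+1) + 4 * W t
def pvW : List Int → Int
  | [] => 0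
  | x :: t => (x + 1) + 4 * pvW t

-- B's pair fold computed in closed form over an arbitrary list and start state
theorem pv_foldB (l : List Int) (i p : Int) :
    l.foldl (fun st x => (st.1 + (x + 1) * st.2, st.2 * 4)) (i, p) =
      (i + p * pvW l, p * 4 ^ l.length) := by
  induction l generalizing i p with
  | nil => simp [pvW]
  | cons x t ih =>
      simp only [List.foldl_cons, ih, pvW, List.length_cons]
      refine Prod.ext ?_ ?_ <;> simp <;> ring

-- relates W of a list to A's Horner fold of its reverse (multiplied through by 3)
theorem pv_W_horner (l : List Int) :
    3 * pvW l = 3 * l.reverse.foldl (fun s x => s * 4 + x) 0 + 4 ^ l.length - 1 := by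
  induction l with
  | nil => simp [pvW]
  | cons x t ih =>
      have happ : (x :: t).reverse.foldl (fun s x => s * 4 + x) 0 =
          (t.reverse.foldl (fun s x => s * 4 + x) 0) * 4 + x := by
        simp [List.reverse_cons, List.foldl_append]
      rw [happ]; simp only [pvW, List.length_cons]
      rw [pow_succ]; linarith

theorem pv_three_dvd (n : Nat) : (3 : Int) ∣ 4 ^ n - 1 := by
  induction n with
  | zero => simp
  | succ k ih =>
      obtain ⟨q, hq⟩ := ih
      exact ⟨4 * q + 1, by rw [pow_succ]; linarith⟩

-- ===== VERDICT (by name: the statement is the Claim_ definition above) =====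
theorem index_from_path_spec : Claim_equal_index_from_path := by
  intro path _ _
  unfold Spec_index_from_path index_from_path index_from_path_alt
  rw [pv_foldB]
  obtain ⟨q, hq⟩ := pv_three_dvd path.length
  have hbase : PySem.Int.floordiv (4 ^ path.length - 1) 3 = q := by
    rw [PySem.Int.floordiv_eq_iff_of_pos (by norm_num)]
    constructor <;> linarith
  have h := pv_W_horner path.reverse
  simp only [List.reverse_reverse, List.length_reverse] at h
  simp only [hbase]
  linarith
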